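-- pv_equiv track=rewrite | github.com/yashitanamdeo/geeks-for-geeks | medium/distinct_difference/solution.py | getDistinctDifference
-- ===== SOURCE A (Python) =====
-- from typing import List
--
-- def getDistinctDifference(N: int, A: List[int]) -> List[int]:
--     st = set()
--     left = [0] * N
--     right = [0] * N
--     for i in range(N):
--         left[i] = len(st)
--         st.add(A[i])
--     st.clear()
--     for i in range(N - 1, -1, -1):
--         right[i] = len(st)
--         st.add(A[i])
--     res = [0] * N
--     for i in range(N):
--         res[i] = left[i] - right[i]
--     return res
-- ===== SOURCE B (Python) =====
-- from typing import List
--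
-- def getDistinctDifference(N: int, A: List[int]) -> List[int]:
--     # One forward pass: a decrementing suffix-frequency map gives the distinct
--     # count to the right, a growing seen-set the distinct count to the left.
--     cnt = {}
--     for i in range(N):
--         x = A[i]
--         cnt[x] = cnt.get(x, 0) + 1
--     seen = set()
--     res = []
--     for i in range(N):
--         x = A[i]
--         cnt[x] -= 1
--         if cnt[x] == 0:
--             del cnt[x]
--         res.append(len(seen) - len(cnt))
--         seen.add(x)
--     return res
-- ===== Notes on version B (the rewrite author's own statement) =====
-- stated objective: alternative
-- what changed: Replaces A's three passes (forward set pass for left counts, backward set pass for right counts, combine pass) with a single forward pass over a pre-built frequency map that is decremented (keys deleted at zero) so its size is the distinct suffix count, while a growing seen-set gives the distinct prefix count.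
import Mathlib
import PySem

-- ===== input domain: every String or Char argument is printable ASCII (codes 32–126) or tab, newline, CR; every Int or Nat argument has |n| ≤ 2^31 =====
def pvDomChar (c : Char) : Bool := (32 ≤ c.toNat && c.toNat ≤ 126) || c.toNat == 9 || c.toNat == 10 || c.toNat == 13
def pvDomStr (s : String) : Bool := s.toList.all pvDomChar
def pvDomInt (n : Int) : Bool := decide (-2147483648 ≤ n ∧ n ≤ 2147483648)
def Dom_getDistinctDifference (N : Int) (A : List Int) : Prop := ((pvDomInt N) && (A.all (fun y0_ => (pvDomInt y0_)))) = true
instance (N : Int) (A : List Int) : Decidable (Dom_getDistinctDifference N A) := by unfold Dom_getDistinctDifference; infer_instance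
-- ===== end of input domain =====

-- B replaces A's three passes (forward set, backward set, combine) with one forward
-- pass over a decrementing frequency map (alternative decomposition, same cost).


-- ===== PORT A =====
-- Literal port of A: forward pass filling `left`, backward pass filling `right`
-- (prepending, since Python assigns right[i] for descending i), then a combine pass.
-- A[i] is ported as pyGetD (Python raises IndexError out of range; excluded by Pre_).
def getDistinctDifference (N : Int) (A : List Int) : List Int :=
  let fwd := (PySem.List.pyRange 0 N 1).foldl
      (fun (p : PySem.Set Int × List Int) i =>
        (p.1.add (PySem.List.pyGetD A i 0), p.2 ++ [((p.1.length : Int))]))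
      (PySem.Set.empty, [])
  let left := fwd.2
  let bwd := (PySem.List.pyRange (N - 1) (-1) (-1)).foldl
      (fun (p : PySem.Set Int × List Int) i =>
        (p.1.add (PySem.List.pyGetD A i 0), ((p.1.length : Int)) :: p.2))
      (PySem.Set.empty, [])
  let right := bwd.2
  (PySem.List.pyRange 0 N 1).foldl
      (fun (res : List Int) i =>
        res ++ [PySem.List.pyGetD left i 0 - PySem.List.pyGetD right i 0]) []

-- ===== PORT B =====
-- Literal port of B: build a frequency dict, then one forward pass that decrements
-- the count of A[i] (deleting the key at zero) and appends len(seen) - len(cnt).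
def getDistinctDifference_alt (N : Int) (A : List Int) : List Int :=
  let cnt0 := (PySem.List.pyRange 0 N 1).foldl
      (fun (d : PySem.Dict Int Int) i =>
        let x := PySem.List.pyGetD A i 0
        d.insert x (d.getD x 0 + 1)) PySem.Dict.empty
  let fin := (PySem.List.pyRange 0 N 1).foldl
      (fun (p : PySem.Dict Int Int × PySem.Set Int × List Int) i =>
        let x := PySem.List.pyGetD A i 0
        let c := p.1.getD x 0 - 1
        let cnt1 := p.1.insert x c
        let cnt2 := if c == 0 then cnt1.erase x else cnt1
        (cnt2, p.2.1.add x, p.2.2 ++ [((p.2.1.length : Int) - (cnt2.size : Int))]))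
      (cnt0, PySem.Set.empty, [])
  fin.2.2

-- ===== PRECONDITION & SPEC =====
-- Pre_ excludes exactly the inputs where A raises IndexError (N > len(A)); B raises there too.
def Pre_getDistinctDifference (N : Int) (A : List Int) : Prop := N ≤ A.length
instance (N : Int) (A : List Int) : Decidable (Pre_getDistinctDifference N A) := by unfold Pre_getDistinctDifference; infer_instance
def pvWitness_getDistinctDifference : Int × List Int := (3, [1, 2, 1])

def Spec_getDistinctDifference (N : Int) (A : List Int) (out : List Int) : Prop := out = getDistinctDifference_alt N A
instance (N : Int) (A : List Int) (out : List Int) : Decidable (Spec_getDistinctDifference N A out) := by unfold Spec_getDistinctDifference; infer_instance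

-- ===== CLAIM (what is proved, stated in full; the proofs are below) =====
def Claim_equal_getDistinctDifference : Prop := ∀ (N : Int) (A : List Int), Dom_getDistinctDifference N A → Pre_getDistinctDifference N A → Spec_getDistinctDifference N A (getDistinctDifference N A)

-- ===== LEMMAS AND PROOFS =====

-- number of distinct elements of a list
def pvDD (l : List Int) : Nat := (PySem.Set.ofList l).length

-- the common closed form both ports are reduced to
def pvSpecList (A' : List Int) : List Int :=
  (List.range A'.length).map (fun i => ((pvDD (A'.take i) : Int)) - ((pvDD (A'.drop (i + 1)) : Int)))

-- the per-key entry of B's dict while the suffix `l` is still unprocessed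
def pvF (l : List Int) : Int → Option (Int × Int) :=
  fun k => if l.count k = 0 then none else some (k, (l.count k : Int))

theorem pvRange0 (N : Int) : PySem.List.pyRange 0 N 1 = List.map (fun k : Nat => (k : Int)) (List.range N.toNat) := by
  rw [PySem.List.pyRange_of_pos _ _ (by norm_num)]
  have hc : (if (0:Int) < N then ((N - 0 + 1 - 1) / 1).toNat else 0) = N.toNat := by
    by_cases h : 0 < N
    · rw [if_pos h]; norm_num
    · rw [if_neg h]; omega
  rw [hc]
  apply List.map_congr_left; intro k _; ring

theorem pvRangeNeg (N : Int) : PySem.List.pyRange (N - 1) (-1) (-1) = List.map (fun k : Nat => N - 1 - (k : Int)) (List.range N.toNat) := by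
  unfold PySem.List.pyRange
  rw [if_neg (by norm_num)]
  rw [if_neg (by norm_num)]
  have hc : (if (-1:Int) < N - 1 then ((N - 1 - -1 + - -1 - 1) / - -1).toNat else 0) = N.toNat := by
    by_cases h : 0 < N
    · rw [if_pos (by omega)]; norm_num
    · rw [if_neg (by omega)]; omega
  rw [hc]
  apply List.map_congr_left; intro k _; ring

theorem pvMapGet (A : List Int) (n : Nat) (h : n ≤ A.length) :
    List.map (fun k : Nat => PySem.List.pyGetD A (k : Int) 0) (List.range n) = A.take n := by
  apply List.ext_getElem
  · simp; omega
  · intro i h1 h2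
    simp only [List.getElem_map, List.getElem_range, List.getElem_take]
    rw [PySem.List.pyGetD_natCast]
    simp at h1
    rw [List.getD_eq_getElem _ _ (by omega)]

theorem pvMapGetRev (A : List Int) (N : Int) (_h0 : 0 ≤ N) (h : N ≤ A.length) :
    List.map (fun k : Nat => PySem.List.pyGetD A (N - 1 - (k : Int)) 0) (List.range N.toNat) = (A.take N.toNat).reverse := by
  apply List.ext_getElem
  · simp; omega
  · intro i h1 h2
    simp only [List.getElem_map, List.getElem_range, List.getElem_reverse, List.getElem_take]
    simp only [List.length_map, List.length_range] at h1
    have : N - 1 - (i : Int) = ((N.toNat - 1 - i : Nat) : Int) := by omega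
    rw [this, PySem.List.pyGetD_natCast, List.getD_eq_getElem _ _ (by omega)]
    congr 1
    simp
    omega

theorem pvOfListConcat (pre : List Int) (x : Int) :
    PySem.Set.ofList (pre ++ [x]) = (PySem.Set.ofList pre).add x := by
  simp [PySem.Set.ofList, List.foldl_append]

theorem pvDDPerm (l1 l2 : List Int) (h : ∀ x : Int, x ∈ l1 ↔ x ∈ l2) : pvDD l1 = pvDD l2 := by
  unfold pvDD
  apply List.Perm.length_eq
  rw [List.perm_ext_iff_of_nodup (PySem.Set.nodup_ofList l1) (PySem.Set.nodup_ofList l2)]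
  intro a
  rw [PySem.Set.mem_ofList, PySem.Set.mem_ofList]
  exact h a

theorem pvLemL (l : List Int) : ∀ (pre acc : List Int),
    l.foldl (fun (p : PySem.Set Int × List Int) x => (p.1.add x, p.2 ++ [((p.1.length : Int))]))
      (PySem.Set.ofList pre, acc)
    = (PySem.Set.ofList (pre ++ l),
       acc ++ (List.range l.length).map (fun i => ((pvDD (pre ++ l.take i) : Int)))) := by
  induction l with
  | nil => intro pre acc; simp
  | cons x l' ih =>
    intro pre acc
    simp only [List.foldl_cons]
    rw [← pvOfListConcat]
    rw [ih (pre ++ [x])]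
    simp only [List.length_cons, List.range_succ_eq_map, List.map_cons, List.map_map]
    refine congrArg₂ Prod.mk ?_ ?_
    · congr 1; simp
    · simp [pvDD, Function.comp_def, List.append_assoc]

theorem pvLemR (l : List Int) : ∀ (pre acc : List Int),
    l.foldl (fun (p : PySem.Set Int × List Int) x => (p.1.add x, ((p.1.length : Int)) :: p.2))
      (PySem.Set.ofList pre, acc)
    = (PySem.Set.ofList (pre ++ l),
       ((List.range l.length).map (fun i => ((pvDD (pre ++ l.take i) : Int)))).reverse ++ acc) := by
  induction l with
  | nil => intro pre acc; simp
  | cons x l' ih =>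
    intro pre acc
    simp only [List.foldl_cons]
    rw [← pvOfListConcat]
    rw [ih (pre ++ [x])]
    simp only [List.length_cons, List.range_succ_eq_map, List.map_cons, List.map_map]
    refine congrArg₂ Prod.mk ?_ ?_
    · congr 1; simp
    · simp [pvDD, Function.comp_def, List.append_assoc]

theorem pvKeysEq (U l : List Int) :
    (U.filterMap (pvF l)).map Prod.fst = U.filter (fun k => !(l.count k == 0)) := by
  simp only [pvF]
  induction U with
  | nil => simp
  | cons k U ih =>
    by_cases h : l.count k = 0
    · simp [h, ih]
    · simp [h, ih]

theorem pvLenEq (U l : List Int) (hU : U.Nodup) (hsub : ∀ x ∈ l, x ∈ U) :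
    (U.filter (fun k => !(l.count k == 0))).length = pvDD l := by
  unfold pvDD
  apply List.Perm.length_eq
  rw [List.perm_ext_iff_of_nodup (hU.filter _) (PySem.Set.nodup_ofList l)]
  intro a
  rw [PySem.Set.mem_ofList, List.mem_filter]
  simp only [Bool.not_eq_eq_eq_not, Bool.not_true, beq_eq_false_iff_ne, ne_eq,
    List.count_eq_zero]
  constructor
  · rintro ⟨-, h2⟩; simpa using h2
  · intro ha; exact ⟨hsub a ha, by simpa using ha⟩

theorem pvItemsStepErase (U : List Int) (x : Int) (l' : List Int) (hc : l'.count x = 0) :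
    ((U.filterMap (pvF (x :: l'))).map (fun p => if p.1 == x then (x, (l'.count x : Int)) else p)).filter
      (fun p => !(p.1 == x)) = U.filterMap (pvF l') := by
  simp only [pvF]
  induction U with
  | nil => simp
  | cons k U ih =>
    by_cases hk : k = x
    · subst hk
      simp [List.count_cons_self, hc]
      simp [hc] at ih
      exact ih
    · have hcc : (x :: l').count k = l'.count k := by
        rw [List.count_cons]; simp [Ne.symm hk]
      by_cases h : l'.count k = 0
      · simp [hcc, h] at ih ⊢
        exact ih
      · simp [hcc, h, hk] at ih ⊢
        exact ih

theorem pvItemsStepKeep (U : List Int) (x : Int) (l' : List Int) (hc : l'.count x ≠ 0) :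
    (U.filterMap (pvF (x :: l'))).map (fun p => if p.1 == x then (x, (l'.count x : Int)) else p)
    = U.filterMap (pvF l') := by
  simp only [pvF]
  induction U with
  | nil => simp
  | cons k U ih =>
    by_cases hk : k = x
    · subst hk
      simp [List.count_cons_self, hc]
      simp only [beq_iff_eq] at ih
      exact ih
    · have hcc : (x :: l').count k = l'.count k := by
        rw [List.count_cons]; simp [Ne.symm hk]
      by_cases h : l'.count k = 0
      · simp [hcc, h] at ih ⊢
        exact ih
      · simp [hcc, h, hk] at ih ⊢
        exact ih

theorem pvLemB (l : List Int) : ∀ (U : List Int) (cnt : PySem.Dict Int Int) (pre acc : List Int),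
    cnt.items = U.filterMap (pvF l) → U.Nodup → (∀ x ∈ l, x ∈ U) →
    (l.foldl (fun (p : PySem.Dict Int Int × PySem.Set Int × List Int) x =>
        let c := p.1.getD x 0 - 1
        let cnt1 := p.1.insert x c
        let cnt2 := if c == 0 then cnt1.erase x else cnt1
        (cnt2, p.2.1.add x, p.2.2 ++ [((p.2.1.length : Int) - (cnt2.size : Int))]))
      (cnt, PySem.Set.ofList pre, acc)).2.2
    = acc ++ (List.range l.length).map
        (fun i => ((pvDD (pre ++ l.take i) : Int)) - ((pvDD (l.drop (i + 1)) : Int))) := by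
  induction l with
  | nil => intro U cnt pre acc _ _ _; simp
  | cons x l' ih =>
    intro U cnt pre acc hinv hU hsub
    have hxU : x ∈ U := hsub x List.mem_cons_self
    have hsub' : ∀ y ∈ l', y ∈ U := fun y hy => hsub y (List.mem_cons_of_mem x hy)
    have hkeys : cnt.keys = U.filter (fun k => !((x :: l').count k == 0)) := by
      simp only [PySem.Dict.keys, hinv]
      exact pvKeysEq U (x :: l')
    have hnodk : cnt.keys.Nodup := by rw [hkeys]; exact hU.filter _
    have hcx : (x :: l').count x = l'.count x + 1 := List.count_cons_self ..
    have hmem : (x, (((x :: l').count x : Nat) : Int)) ∈ cnt.items := by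
      rw [hinv]
      apply List.mem_filterMap.2
      exact ⟨x, hxU, by simp [pvF, hcx]⟩
    have hgd : cnt.getD x 0 = (((x :: l').count x : Nat) : Int) :=
      PySem.Dict.getD_of_mem_items cnt hmem hnodk 0
    have hc : cnt.getD x 0 - 1 = ((l'.count x : Nat) : Int) := by
      rw [hgd, hcx]; push_cast; ring
    have hctn : cnt.contains x = true := by
      rw [PySem.Dict.contains_iff_mem_keys, hkeys, List.mem_filter]
      exact ⟨hxU, by simp [hcx]⟩
    have hins : (cnt.insert x (((l'.count x : Nat) : Int))).items
        = cnt.items.map (fun p => if p.1 == x then (x, ((l'.count x : Nat) : Int)) else p) := by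
      rw [PySem.Dict.items_insert_of_contains cnt _ hctn]
    simp only [List.foldl_cons]
    rw [hc]
    by_cases h0 : l'.count x = 0
    · have hz : ((((l'.count x : Nat) : Int)) == 0) = true := by simp [h0]
      rw [if_pos hz]
      have hitems : ((cnt.insert x (((l'.count x : Nat) : Int))).erase x).items = U.filterMap (pvF l') := by
        simp only [PySem.Dict.erase, hins, hinv]
        exact pvItemsStepErase U x l' h0
      have hsz : ((cnt.insert x (((l'.count x : Nat) : Int))).erase x).size = pvDD l' := by
        have : ((cnt.insert x (((l'.count x : Nat) : Int))).erase x).items.length = pvDD l' := by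
          rw [hitems, ← pvLenEq U l' hU hsub', ← pvKeysEq U l', List.length_map]
        simpa [PySem.Dict.size] using this
      rw [← pvOfListConcat, hsz]
      rw [ih U _ (pre ++ [x]) _ hitems hU hsub']
      simp only [List.length_cons, List.range_succ_eq_map, List.map_cons, List.map_map]
      simp [pvDD, Function.comp_def, List.append_assoc]
    · have hz : ((((l'.count x : Nat) : Int)) == 0) = false := by simp [h0]
      rw [if_neg (by simp [hz])]
      have hitems : (cnt.insert x (((l'.count x : Nat) : Int))).items = U.filterMap (pvF l') := by
        rw [hins, hinv]
        exact pvItemsStepKeep U x l' h0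
      have hsz : (cnt.insert x (((l'.count x : Nat) : Int))).size = pvDD l' := by
        have : (cnt.insert x (((l'.count x : Nat) : Int))).items.length = pvDD l' := by
          rw [hitems, ← pvLenEq U l' hU hsub', ← pvKeysEq U l', List.length_map]
        simpa [PySem.Dict.size] using this
      rw [← pvOfListConcat, hsz]
      rw [ih U _ (pre ++ [x]) _ hitems hU hsub']
      simp only [List.length_cons, List.range_succ_eq_map, List.map_cons, List.map_map]
      simp [pvDD, Function.comp_def, List.append_assoc]

theorem pvCounterItems (U : List Int) (l : List Int) (h : ∀ k ∈ U, k ∈ l) :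
    U.map (fun k => (k, (l.count k : Int))) = U.filterMap (pvF l) := by
  induction U with
  | nil => simp
  | cons k U ih =>
    have hk : l.count k ≠ 0 := fun hz => (List.count_eq_zero.mp hz) (h k List.mem_cons_self)
    simp only [List.map_cons, List.filterMap_cons, pvF, if_neg hk]
    rw [ih (fun a ha => h a (List.mem_cons_of_mem k ha))]
    rfl

theorem pvPortA (N : Int) (A : List Int) (h0 : 0 ≤ N) (h : N ≤ A.length) :
    getDistinctDifference N A = pvSpecList (A.take N.toNat) := by
  have hn : N.toNat ≤ A.length := by omega
  have hlen : (A.take N.toNat).length = N.toNat := by simp; omega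
  simp only [getDistinctDifference]
  rw [pvRange0, pvRangeNeg]
  -- forward loop
  rw [show (List.foldl
      (fun (p : PySem.Set Int × List Int) i =>
        (p.1.add (PySem.List.pyGetD A i 0), p.2 ++ [((p.1.length : Int))]))
      (PySem.Set.empty, []) (List.map (fun k : Nat => (k : Int)) (List.range N.toNat)))
    = (PySem.Set.ofList ([] ++ A.take N.toNat),
       [] ++ (List.range (A.take N.toNat).length).map (fun i => ((pvDD ([] ++ (A.take N.toNat).take i) : Int)))) from by
      rw [List.foldl_map, ← List.foldl_map (f := fun k : Nat => PySem.List.pyGetD A (k : Int) 0)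
        (g := fun (p : PySem.Set Int × List Int) x => (p.1.add x, p.2 ++ [((p.1.length : Int))])),
        pvMapGet A N.toNat hn]
      exact pvLemL (A.take N.toNat) [] []]
  -- backward loop
  rw [show (List.foldl
      (fun (p : PySem.Set Int × List Int) i =>
        (p.1.add (PySem.List.pyGetD A i 0), ((p.1.length : Int)) :: p.2))
      (PySem.Set.empty, []) (List.map (fun k : Nat => N - 1 - (k : Int)) (List.range N.toNat)))
    = (PySem.Set.ofList ([] ++ (A.take N.toNat).reverse),
       ((List.range (A.take N.toNat).reverse.length).map
         (fun i => ((pvDD ([] ++ (A.take N.toNat).reverse.take i) : Int)))).reverse ++ []) from by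
      rw [List.foldl_map, ← List.foldl_map (f := fun k : Nat => PySem.List.pyGetD A (N - 1 - (k : Int)) 0)
        (g := fun (p : PySem.Set Int × List Int) x => (p.1.add x, ((p.1.length : Int)) :: p.2)),
        pvMapGetRev A N h0 h]
      exact pvLemR (A.take N.toNat).reverse [] []]
  -- combine loop
  rw [List.foldl_map]
  rw [← List.foldl_map (f := fun k : Nat =>
        PySem.List.pyGetD ([] ++ (List.range (A.take N.toNat).length).map (fun i => ((pvDD ([] ++ (A.take N.toNat).take i) : Int)))) (k : Int) 0
        - PySem.List.pyGetD ((((List.range (A.take N.toNat).reverse.length).map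
            (fun i => ((pvDD ([] ++ (A.take N.toNat).reverse.take i) : Int)))).reverse ++ [])) (k : Int) 0)
      (g := fun (res : List Int) x => res ++ [x])]
  rw [PySem.List.foldl_append_singleton_eq_map]
  unfold pvSpecList
  rw [hlen]
  simp only [List.map_map]
  apply List.map_congr_left
  intro k hk
  rw [List.mem_range] at hk
  simp only [Function.comp_apply, List.nil_append, List.append_nil]
  rw [PySem.List.pyGetD_natCast, PySem.List.pyGetD_natCast]
  rw [List.getD_eq_getElem _ _ (by simpa using hk)]
  rw [List.getD_eq_getElem _ _ (by simp [hlen]; omega)]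
  simp only [List.getElem_map, List.getElem_range, List.getElem_reverse]
  congr 1
  simp only [List.length_map, List.length_range, List.length_reverse, hlen]
  congr 1
  rw [List.take_reverse]
  rw [show (A.take N.toNat).length - (N.toNat - 1 - k) = k + 1 from by rw [hlen]; omega]
  exact pvDDPerm _ _ (by intro y; simp)

theorem pvPortB (N : Int) (A : List Int) (h0 : 0 ≤ N) (h : N ≤ A.length) :
    getDistinctDifference_alt N A = pvSpecList (A.take N.toNat) := by
  have hn : N.toNat ≤ A.length := by omega
  have hlen : (A.take N.toNat).length = N.toNat := by simp; omega
  simp only [getDistinctDifference_alt]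
  rw [pvRange0]
  rw [show (List.foldl
      (fun (d : PySem.Dict Int Int) i =>
        let x := PySem.List.pyGetD A i 0
        d.insert x (d.getD x 0 + 1)) PySem.Dict.empty
      (List.map (fun k : Nat => (k : Int)) (List.range N.toNat)))
    = PySem.Dict.counter (A.take N.toNat) from by
      rw [List.foldl_map, ← List.foldl_map (f := fun k : Nat => PySem.List.pyGetD A (k : Int) 0)
        (g := fun (d : PySem.Dict Int Int) x => d.insert x (d.getD x 0 + 1)),
        pvMapGet A N.toNat hn]
      exact PySem.Dict.foldl_insert_getD_add_one_eq_counter (A.take N.toNat)]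
  rw [List.foldl_map, ← List.foldl_map (f := fun k : Nat => PySem.List.pyGetD A (k : Int) 0)
      (g := fun (p : PySem.Dict Int Int × PySem.Set Int × List Int) x =>
        let c := p.1.getD x 0 - 1
        let cnt1 := p.1.insert x c
        let cnt2 := if c == 0 then cnt1.erase x else cnt1
        (cnt2, p.2.1.add x, p.2.2 ++ [((p.2.1.length : Int) - (cnt2.size : Int))])),
      pvMapGet A N.toNat hn]
  have hitems : (PySem.Dict.counter (A.take N.toNat)).items
      = (PySem.Set.ofList (A.take N.toNat)).filterMap (pvF (A.take N.toNat)) := by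
    rw [PySem.Dict.items_counter]
    exact pvCounterItems _ _ (fun k hk => (PySem.Set.mem_ofList _ _).1 hk)
  have := pvLemB (A.take N.toNat) (PySem.Set.ofList (A.take N.toNat))
      (PySem.Dict.counter (A.take N.toNat)) [] [] hitems
      (PySem.Set.nodup_ofList _) (fun x hx => (PySem.Set.mem_ofList _ _).2 hx)
  rw [show PySem.Set.empty = PySem.Set.ofList ([] : List Int) from rfl]
  rw [this]
  unfold pvSpecList
  simp

theorem pvNeg (N : Int) (A : List Int) (h : N < 0) :
    getDistinctDifference N A = [] ∧ getDistinctDifference_alt N A = [] := by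
  have h0 : N.toNat = 0 := by omega
  constructor
  · simp only [getDistinctDifference]
    rw [pvRange0, h0]
    simp
  · simp only [getDistinctDifference_alt]
    rw [pvRange0, h0]
    simp

-- ===== VERDICT (by name: the statement is the Claim_ definition above) =====
theorem getDistinctDifference_spec : Claim_equal_getDistinctDifference := by
  intro N A _ hpre
  unfold Spec_getDistinctDifference
  rcases lt_or_ge N 0 with hN | hN
  · rw [(pvNeg N A hN).1, (pvNeg N A hN).2]
  · have h : N ≤ (A.length : Int) := hpre
    rw [pvPortA N A hN h, pvPortB N A hN h]
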